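-- pv_equiv track=rewrite | github.com/creepykai/proyecto_IreneDiges | clases/libro.py | contiene_letras
-- ===== SOURCE A (Python) =====
-- def contiene_letras(texto: str) -> bool:
--     contiene: bool = False
--     i: int = 0
--
--     while i < len(texto) and not contiene:
--         if texto[i] in "abcdefghijklmnopqrstuvwxyzABCDEFGHIJKLMNOPQRSTUVWXYZ":
--             contiene = True
--         i += 1
--
--     return contiene
-- ===== SOURCE B (Python) =====
-- def contiene_letras(texto: str) -> bool:
--     # Loop order swapped: iterate over the fixed 52-letter alphabet and ask,
--     # for each letter, whether it occurs anywhere in the text.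
--     return any(letra in texto for letra in "abcdefghijklmnopqrstuvwxyzABCDEFGHIJKLMNOPQRSTUVWXYZ")
-- ===== Notes on version B (the rewrite author's own statement) =====
-- stated objective: alternative
-- what changed: Inverts the traversal: instead of scanning the text with a flag and testing each character against the alphabet, B loops over the fixed 52-letter alphabet and checks each letter for occurrence in the text (any(letra in texto ...)).
import Mathlib
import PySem

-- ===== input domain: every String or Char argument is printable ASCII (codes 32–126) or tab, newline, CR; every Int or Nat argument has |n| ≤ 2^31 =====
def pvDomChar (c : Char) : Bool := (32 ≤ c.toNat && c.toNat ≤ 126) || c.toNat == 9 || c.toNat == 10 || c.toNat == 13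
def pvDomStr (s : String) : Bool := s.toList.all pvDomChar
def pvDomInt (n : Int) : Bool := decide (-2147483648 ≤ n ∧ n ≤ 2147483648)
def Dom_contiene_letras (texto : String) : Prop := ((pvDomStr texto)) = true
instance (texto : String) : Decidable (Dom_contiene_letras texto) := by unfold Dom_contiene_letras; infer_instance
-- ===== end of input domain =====

-- B inverts the traversal: it loops over the fixed 52-letter alphabet and asks whether each
-- letter occurs in the text, instead of scanning the text with a flag (alternative; same result).

-- ===== PORT A =====
def pvLetters : List Char := "abcdefghijklmnopqrstuvwxyzABCDEFGHIJKLMNOPQRSTUVWXYZ".toList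

-- while i < len(texto) and not contiene: …  — recursion over the remaining characters with the flag as state
def pvALoop : List Char → Bool → Bool
  | [], contiene => contiene
  | _ :: _, true => true
  | ch :: rest, false => pvALoop rest (if pvLetters.contains ch then true else false)

def contiene_letras (texto : String) : Bool := pvALoop texto.toList false

-- ===== PORT B =====
-- any(letra in texto for letra in <alphabet>); 'letra in texto' is single-character substring
-- containment, which is exactly character membership in texto, ported as List.contains.
def contiene_letras_alt (texto : String) : Bool :=
  pvLetters.any (fun letra => texto.toList.contains letra)

-- ===== PRECONDITION & SPEC =====
def Spec_contiene_letras (texto : String) (out : Bool) : Prop := out = contiene_letras_alt texto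
instance (texto : String) (out : Bool) : Decidable (Spec_contiene_letras texto out) := by unfold Spec_contiene_letras; infer_instance

-- ===== CLAIM =====
def Claim_equal_contiene_letras : Prop := ∀ (texto : String), Dom_contiene_letras texto → Spec_contiene_letras texto (contiene_letras texto)

-- ===== LEMMAS AND PROOFS =====

theorem pvALoop_true (cs : List Char) : pvALoop cs true = true := by
  cases cs <;> rfl

theorem pvALoop_eq_any (cs : List Char) :
    pvALoop cs false = cs.any (fun c => pvLetters.contains c) := by
  induction cs with
  | nil => rfl
  | cons ch rest ih =>
      show pvALoop rest (if pvLetters.contains ch then true else false) = _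
      cases h : pvLetters.contains ch with
      | true =>
          have hm : ch ∈ pvLetters := by simpa using h
          simp [pvALoop_true, hm]
      | false =>
          have hm : ch ∉ pvLetters := by simpa using h
          simp [hm, ih]

-- the two nested "exists" commute: ∃ c ∈ text, c ∈ letters ↔ ∃ l ∈ letters, l ∈ text
theorem any_comm (cs : List Char) :
    cs.any (fun c => pvLetters.contains c)
      = pvLetters.any (fun letra => cs.contains letra) := by
  rw [Bool.eq_iff_iff]
  simp only [List.any_eq_true, List.contains_eq_mem, decide_eq_true_eq]
  constructor <;> rintro ⟨x, h1, h2⟩ <;> exact ⟨x, h2, h1⟩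

-- ===== VERDICT =====
theorem contiene_letras_spec : Claim_equal_contiene_letras := by
  intro texto _
  unfold Spec_contiene_letras contiene_letras contiene_letras_alt
  rw [pvALoop_eq_any, any_comm]
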